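-- pv_equiv track=rewrite | github.com/chetanuchiha16/KawaiiProjects | Python/AEC/test/p3a.py | count
-- ===== SOURCE A (Python) =====
-- def count(Sent):
--     wc = dc = uc = lc = 0
--     wc = len(Sent.split())
--
--     for char in Sent:
--         if char.isdigit():
--             dc +=1
--         elif char.isupper():
--             uc += 1
--         elif char.islower():
--             lc += 1
--
--     return wc,dc,uc,lc
-- ===== SOURCE B (Python) =====
-- def count(Sent):
--     # character-frequency table built once, then classified per DISTINCT character;
--     # word count by scanning for word starts (non-space preceded by space/start)
--     freq = {}
--     for c in Sent:
--         freq[c] = freq.get(c, 0) + 1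
--     dc = uc = lc = 0
--     for c, n in freq.items():
--         if c.isdigit():
--             dc += n
--         elif c.isupper():
--             uc += n
--         elif c.islower():
--             lc += n
--     wc = 0
--     prev = ' '
--     for c in Sent:
--         if prev.isspace() and not c.isspace():
--             wc += 1
--         prev = c
--     return wc, dc, uc, lc
-- ===== Notes on version B (the rewrite author's own statement) =====
-- stated objective: alternative
-- what changed: Word count is computed by a word-start boundary scan (non-space preceded by space/start) instead of len(split()), and character tallies come from a frequency dictionary built once and then classified per distinct character, instead of A's fused per-character if/elif accumulators.
import Mathlib
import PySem

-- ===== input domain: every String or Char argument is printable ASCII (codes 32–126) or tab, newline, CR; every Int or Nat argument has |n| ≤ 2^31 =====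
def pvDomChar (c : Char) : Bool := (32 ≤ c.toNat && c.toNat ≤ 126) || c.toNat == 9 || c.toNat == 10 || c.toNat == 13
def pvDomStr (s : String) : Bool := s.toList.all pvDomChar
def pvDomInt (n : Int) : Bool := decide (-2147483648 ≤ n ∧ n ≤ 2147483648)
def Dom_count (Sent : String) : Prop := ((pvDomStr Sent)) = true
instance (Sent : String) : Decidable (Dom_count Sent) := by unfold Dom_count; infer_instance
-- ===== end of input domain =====

-- B replaces A's split()-based word count and fused per-character if/elif tally by a character-frequency
-- table classified per DISTINCT character plus a word-start boundary scan (alternative algorithm; same cost).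

-- ===== PORT A =====
-- the for-loop over Sent with the if/elif chain, carried as a fold over (dc, uc, lc)
def countLoopA (st : Int × Int × Int) (c : Char) : Int × Int × Int :=
  if PySem.Chars.isdigit c then (st.1 + 1, st.2.1, st.2.2)
  else if PySem.Chars.isupper c then (st.1, st.2.1 + 1, st.2.2)
  else if PySem.Chars.islower c then (st.1, st.2.1, st.2.2 + 1)
  else st

def count (Sent : String) : Int × Int × Int × Int :=
  let wc : Int := (PySem.Str.split₀ Sent).length
  let st := Sent.toList.foldl countLoopA (0, 0, 0)
  (wc, st.1, st.2.1, st.2.2)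

-- ===== PORT B =====
-- second loop of B: 'for c, n in freq.items(): if … dc += n elif … uc += n elif … lc += n'
def countLoopB (st : Int × Int × Int) (p : Char × Int) : Int × Int × Int :=
  if PySem.Chars.isdigit p.1 then (st.1 + p.2, st.2.1, st.2.2)
  else if PySem.Chars.isupper p.1 then (st.1, st.2.1 + p.2, st.2.2)
  else if PySem.Chars.islower p.1 then (st.1, st.2.1, st.2.2 + p.2)
  else st

-- third loop of B: word-start boundary scan carrying (wc, prev)
def wordLoopB (st : Int × Char) (c : Char) : Int × Char :=
  (if PySem.Chars.isspace st.2 && !PySem.Chars.isspace c then st.1 + 1 else st.1, c)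

def count_alt (Sent : String) : Int × Int × Int × Int :=
  let xs := Sent.toList
  let freq := xs.foldl (fun d c => d.insert c (d.getD c 0 + 1)) PySem.Dict.empty
  let st := freq.items.foldl countLoopB (0, 0, 0)
  let wp := xs.foldl wordLoopB (0, ' ')
  (wp.1, st.1, st.2.1, st.2.2)

-- ===== PRECONDITION & SPEC =====
def Spec_count (Sent : String) (out : Int × Int × Int × Int) : Prop := out = count_alt Sent
instance (Sent : String) (out : Int × Int × Int × Int) : Decidable (Spec_count Sent out) := by unfold Spec_count; infer_instance

-- ===== CLAIM (what is proved, stated in full; the proofs are below) =====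
def Claim_equal_count : Prop := ∀ (Sent : String), Dom_count Sent → Spec_count Sent (count Sent)

-- ===== LEMMAS AND PROOFS =====

-- number of word starts in l, given whether the previous character was whitespace
def starts (b : Bool) : List Char → Nat
  | [] => 0
  | c :: r => (if b && !PySem.Chars.isspace c then 1 else 0) + starts (PySem.Chars.isspace c) r

-- split₀.go's result length = words already closed + the open word + word starts still to come
theorem go_length (s : List Char) (cur : List Char) (acc : List (List Char)) :
    (PySem.Chars.split₀.go s cur acc).length =
      acc.length + (if cur.isEmpty then 0 else 1) + starts cur.isEmpty s := by
  induction s generalizing cur acc with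
  | nil =>
    by_cases h : cur.isEmpty <;> simp [PySem.Chars.split₀.go, h, starts]
  | cons c rest ih =>
    by_cases hs : PySem.Chars.isspace c <;> by_cases h : cur.isEmpty <;>
      simp [PySem.Chars.split₀.go, hs, h, starts, ih] <;> omega

theorem split_len (s : List Char) :
    (PySem.Chars.split₀ s).length = starts true s := by
  have := go_length s [] []
  simpa [PySem.Chars.split₀] using this

-- B's boundary scan computes the same word-start count
theorem wordLoopB_eq (s : List Char) (w : Int) (prev : Char) :
    (s.foldl wordLoopB (w, prev)).1 = w + (starts (PySem.Chars.isspace prev) s : Int) := by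
  induction s generalizing w prev with
  | nil => simp [starts]
  | cons c rest ih =>
    by_cases hp : PySem.Chars.isspace prev <;> by_cases hc : PySem.Chars.isspace c <;>
      simp [wordLoopB, hp, hc, starts, ih] <;> push_cast <;> ring

-- A's fused loop: three countP's of the composite elif predicates
theorem loopA_eq (l : List Char) (d u c : Int) :
    l.foldl countLoopA (d, u, c) =
      (d + (l.countP PySem.Chars.isdigit : Int),
       u + (l.countP (fun x => !PySem.Chars.isdigit x && PySem.Chars.isupper x) : Int),
       c + (l.countP (fun x => !PySem.Chars.isdigit x && !PySem.Chars.isupper x && PySem.Chars.islower x) : Int)) := by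
  induction l generalizing d u c with
  | nil => simp
  | cons hd tl ih =>
    simp only [List.foldl_cons, countLoopA, List.countP_cons]
    by_cases h1 : PySem.Chars.isdigit hd <;> by_cases h2 : PySem.Chars.isupper hd <;>
      by_cases h3 : PySem.Chars.islower hd <;>
      simp [h1, h2, h3, ih] <;> push_cast <;> ring

-- B's items loop over arbitrary pairs: three weighted sums of the same composite predicates
theorem loopB_eq (ps : List (Char × Int)) (d u c : Int) :
    ps.foldl countLoopB (d, u, c) =
      (d + (ps.map (fun p => if PySem.Chars.isdigit p.1 then p.2 else 0)).sum,
       u + (ps.map (fun p => if !PySem.Chars.isdigit p.1 && PySem.Chars.isupper p.1 then p.2 else 0)).sum,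
       c + (ps.map (fun p => if !PySem.Chars.isdigit p.1 && !PySem.Chars.isupper p.1 && PySem.Chars.islower p.1 then p.2 else 0)).sum) := by
  induction ps generalizing d u c with
  | nil => simp
  | cons hd tl ih =>
    simp only [List.foldl_cons, countLoopB, List.map_cons, List.sum_cons]
    by_cases h1 : PySem.Chars.isdigit hd.1 <;> by_cases h2 : PySem.Chars.isupper hd.1 <;>
      by_cases h3 : PySem.Chars.islower hd.1 <;>
      simp [h1, h2, h3, ih, Prod.ext_iff] <;> omega

-- in a Nodup list containing x, the indicator-at-x sum picks out f x
theorem sum_pick (D : List Char) (x : Char) (hD : D.Nodup) (hx : x ∈ D) (f : Char → Int) :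
    (D.map (fun c => if c = x then f c else 0)).sum = f x := by
  induction D with
  | nil => simp at hx
  | cons a t ih =>
    rcases List.nodup_cons.mp hD with ⟨ha, ht⟩
    by_cases hax : a = x
    · subst hax
      have hz : (t.map (fun c => if c = a then f c else 0)).sum = 0 := by
        apply List.sum_eq_zero
        intro y hy
        rcases List.mem_map.mp hy with ⟨c, hc, hcy⟩
        have hca : c ≠ a := fun e => ha (e ▸ hc)
        simp [← hcy, hca]
      simp [hz]
    · have hxt : x ∈ t := by
        rcases List.mem_cons.mp hx with h | h
        · exact absurd h.symm hax
        · exact h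
      simp [hax, ih ht hxt]

-- weighted sum of counts over the distinct elements = countP over the whole list
theorem sum_hist (D : List Char) (hD : D.Nodup) (xs : List Char)
    (hx : ∀ x ∈ xs, x ∈ D) (p : Char → Bool) :
    (D.map (fun c => if p c then (xs.count c : Int) else 0)).sum = (xs.countP p : Int) := by
  induction xs with
  | nil => simp
  | cons x t ih =>
    have hx' : ∀ y ∈ t, y ∈ D := fun y hy => hx y (List.mem_cons_of_mem _ hy)
    have hxd : x ∈ D := hx x List.mem_cons_self
    have hsplit : ∀ c : Char,
        (if p c then ((x :: t).count c : Int) else 0) =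
          (if p c then (t.count c : Int) else 0) + (if c = x then (if p c then (1:Int) else 0) else 0) := by
      intro c
      by_cases hpc : p c
      · by_cases hcx : c = x
        · subst hcx
          simp [hpc, List.count_cons_self]
        · have hcc : (x :: t).count c = t.count c := by
            simp [List.count_cons, Ne.symm hcx]
          simp [hpc, hcx, hcc]
      · simp [hpc]
    calc (D.map (fun c => if p c then ((x :: t).count c : Int) else 0)).sum
        = (D.map (fun c => (if p c then (t.count c : Int) else 0) + (if c = x then (if p c then (1:Int) else 0) else 0))).sum := by
          exact congrArg List.sum (List.map_congr_left (fun c _ => hsplit c))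
      _ = (D.map (fun c => if p c then (t.count c : Int) else 0)).sum
            + (D.map (fun c => if c = x then (if p c then (1:Int) else 0) else 0)).sum :=
          PySem.List.sum_map_add_int D _ _
      _ = (t.countP p : Int) + (if p x then (1:Int) else 0) := by
          rw [ih hx', sum_pick D x hD hxd]
      _ = ((x :: t).countP p : Int) := by
          by_cases hpx : p x <;> simp [hpx]

theorem count_eq (Sent : String) : count Sent = count_alt Sent := by
  unfold count count_alt
  simp only [PySem.Str.split₀, List.length_map,
    PySem.Dict.foldl_insert_getD_add_one_eq_counter, PySem.Dict.items_counter]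
  rw [split_len, loopA_eq, loopB_eq, wordLoopB_eq]
  have hsp : PySem.Chars.isspace ' ' = true := by decide
  rw [hsp]
  have hD := PySem.Set.nodup_ofList Sent.toList
  have hm : ∀ x ∈ Sent.toList, x ∈ PySem.Set.ofList Sent.toList :=
    fun x hx => (PySem.Set.mem_ofList Sent.toList x).mpr hx
  simp only [List.map_map, zero_add]
  exact Prod.ext_iff.mpr ⟨rfl, Prod.ext_iff.mpr ⟨(sum_hist _ hD _ hm _).symm,
    Prod.ext_iff.mpr ⟨(sum_hist _ hD _ hm _).symm, (sum_hist _ hD _ hm _).symm⟩⟩⟩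

-- ===== VERDICT (by name: the statement is the Claim_ definition above) =====
theorem count_spec : Claim_equal_count := by
  intro Sent _
  unfold Spec_count
  exact count_eq Sent
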